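-- pv_equiv track=rewrite | github.com/sgao26/pract-coding | python/vowel-families.py | same_vowel_group
-- ===== SOURCE A (Python) =====
-- def same_vowel_group(w):
-- 	result = []
-- 	vowels = {'a', 'e', 'i', 'o', 'u'}
-- 	first_word_vowels = vowels.intersection(set(w[0]))
-- 	for word in w:
-- 		if vowels.intersection(set(word)) == first_word_vowels:
-- 			result.append(word)
-- 	return result
-- ===== SOURCE B (Python) =====
-- def same_vowel_group(w):
-- 	first_key = tuple(v for v in 'aeiou' if v in w[0])
-- 	groups = {}
-- 	for word in w:
-- 		k = tuple(v for v in 'aeiou' if v in word)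
-- 		groups.setdefault(k, []).append(word)
-- 	return groups[first_key]
-- ===== Notes on version B (the rewrite author's own statement) =====
-- stated objective: alternative
-- what changed: B replaces per-word set-intersection-and-compare against the first word's vowel set with a build-then-lookup structure: one pass groups all words into a dict keyed by a canonical vowel-key tuple, and the answer is the bucket of the first word's key.
-- outside the precondition, e.g. on same_vowel_group([]): A raises IndexError, B raises IndexError
import Mathlib
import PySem

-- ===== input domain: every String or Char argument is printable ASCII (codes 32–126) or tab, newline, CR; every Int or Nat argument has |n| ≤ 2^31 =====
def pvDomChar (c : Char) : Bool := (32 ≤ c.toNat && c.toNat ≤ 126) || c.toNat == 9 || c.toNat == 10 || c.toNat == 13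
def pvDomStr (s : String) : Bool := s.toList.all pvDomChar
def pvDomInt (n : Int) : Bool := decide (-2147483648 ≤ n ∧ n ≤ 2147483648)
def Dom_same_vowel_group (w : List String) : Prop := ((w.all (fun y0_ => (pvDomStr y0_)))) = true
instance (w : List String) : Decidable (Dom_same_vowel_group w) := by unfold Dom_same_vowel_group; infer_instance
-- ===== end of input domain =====

-- B groups all words into a dict of vowel-family buckets keyed by a canonical vowel tuple and
-- returns the first word's bucket, instead of A's filter-by-set-comparison; objective: alternative.


-- ===== PORT A =====
-- vowels = {'a','e','i','o','u'}
def pvVowels : PySem.Set Char := PySem.Set.ofList ['a', 'e', 'i', 'o', 'u']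

-- w[0] is total-guarded with pyGetD; Pre_ excludes the empty list, where Python raises IndexError
def same_vowel_group (w : List String) : List String :=
  let firstWordVowels :=
    PySem.Set.inter pvVowels (PySem.Set.ofList (PySem.List.pyGetD w 0 "").toList)
  w.foldl (fun result word =>
    if PySem.Set.equal (PySem.Set.inter pvVowels (PySem.Set.ofList word.toList)) firstWordVowels
    then result ++ [word] else result) []

-- ===== PORT B =====
-- tuple(v for v in 'aeiou' if v in word)
def pvKey (word : String) : List Char :=
  "aeiou".toList.filter (fun v => word.toList.contains v)

-- w[0] total-guarded with pyGetD (IndexError on []); the final groups[first_key] is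
-- total-guarded with getD [] (under Pre_ the key is always present)
def same_vowel_group_alt (w : List String) : List String :=
  let firstKey := pvKey (PySem.List.pyGetD w 0 "")
  let groups := w.foldl
    (fun d word => d.modify (pvKey word) [] (fun ys => ys ++ [word]))
    PySem.Dict.empty
  (groups.get? firstKey).getD []

-- ===== PRECONDITION & SPEC =====
-- A (and B) raise IndexError on the empty list (w[0]); Pre_ excludes exactly that input.
def Pre_same_vowel_group (w : List String) : Prop := w ≠ []
instance (w : List String) : Decidable (Pre_same_vowel_group w) := by unfold Pre_same_vowel_group; infer_instance
def pvWitness_same_vowel_group : List String := ["tree", "bee", "cat"]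

def Spec_same_vowel_group (w : List String) (out : List String) : Prop := out = same_vowel_group_alt w
instance (w : List String) (out : List String) : Decidable (Spec_same_vowel_group w out) := by unfold Spec_same_vowel_group; infer_instance

-- ===== CLAIM (what is proved, stated in full; the proofs are below) =====
def Claim_equal_same_vowel_group : Prop := ∀ (w : List String), Dom_same_vowel_group w → Pre_same_vowel_group w → Spec_same_vowel_group w (same_vowel_group w)

-- ===== LEMMAS AND PROOFS =====

-- vowels ∩ set(word) is exactly the canonical key list
theorem pv_inter_eq_key (word : String) :
    PySem.Set.inter pvVowels (PySem.Set.ofList word.toList) = pvKey word := by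
  have hv : pvVowels = ['a', 'e', 'i', 'o', 'u'] := by decide
  have ha : "aeiou".toList = ['a', 'e', 'i', 'o', 'u'] := by decide
  rw [pvKey, ha, hv, PySem.Set.inter]
  apply List.filter_congr
  intro x _
  simp [PySem.Set.contains, PySem.Set.mem_ofList]

-- set equality of two canonical keys is list equality of the keys
theorem pv_equal_key (a b : String) :
    PySem.Set.equal (pvKey a) (pvKey b) = (pvKey a == pvKey b) := by
  by_cases h : pvKey a = pvKey b
  · simp [h, PySem.Set.equal_iff]
  · have hne : (pvKey a == pvKey b) = false := by simp [h]
    rw [hne]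
    by_contra hc
    have heq : PySem.Set.equal (pvKey a) (pvKey b) = true := by
      cases hq : PySem.Set.equal (pvKey a) (pvKey b) <;> simp_all
    have hmem := (PySem.Set.equal_iff _ _).mp heq
    apply h
    unfold pvKey
    apply List.filter_congr
    intro x hx
    have h1 : x ∈ pvKey a ↔ (a.toList.contains x) = true := by
      unfold pvKey; simp only [List.mem_filter, hx, true_and]
    have h2 : x ∈ pvKey b ↔ (b.toList.contains x) = true := by
      unfold pvKey; simp only [List.mem_filter, hx, true_and]
    have := (hmem x)
    rw [h1, h2] at this
    cases hcb : b.toList.contains x <;> cases hca : a.toList.contains x <;> simp_all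

theorem same_vowel_group_eq_filter (w : List String) :
    same_vowel_group w =
      w.filter (fun word => pvKey word == pvKey (PySem.List.pyGetD w 0 "")) := by
  unfold same_vowel_group
  simp only [pv_inter_eq_key, pv_equal_key]
  rw [PySem.List.foldl_append_if_eq_filter]
  simp

theorem same_vowel_group_alt_eq_filter (w : List String) :
    same_vowel_group_alt w =
      w.filter (fun word => pvKey word == pvKey (PySem.List.pyGetD w 0 "")) := by
  unfold same_vowel_group_alt
  simp only []
  rw [← PySem.Dict.getD_eq_get?_getD]
  have hmap : w.foldl
      (fun d word => d.modify (pvKey word) [] (fun ys => ys ++ [word]))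
      PySem.Dict.empty
    = (w.map (fun x => (pvKey x, x))).foldl
      (fun d p => d.modify p.1 [] (fun ys => ys ++ [p.2])) PySem.Dict.empty := by
    rw [List.foldl_map]
  rw [hmap, PySem.Dict.getD_foldl_modify_append]
  simp [List.filter_map, Function.comp_def]

-- ===== VERDICT (by name: the statement is the Claim_ definition above) =====
theorem same_vowel_group_spec : Claim_equal_same_vowel_group := by
  intro w _ _
  unfold Spec_same_vowel_group
  rw [same_vowel_group_eq_filter, same_vowel_group_alt_eq_filter]
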